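-- pv_equiv track=rewrite | github.com/TSTP-Enterprises/TSTP-NSATT | storage/scripts/nsatt_web/modules/wireless_scans.py | format_networks_as_html
-- ===== SOURCE A (Python) =====
-- def format_networks_as_html(networks):
--     html = ""
--     for bssid, data in networks.items():
--         html += f"<tr>"
--         html += f"<td>{bssid}</td>"
--         html += f"<td>{data.get('power', 'N/A')}</td>"
--         html += f"<td>{data.get('channel', 'N/A')}</td>"
--         html += f"<td>{data.get('beacons', 'N/A')}</td>"
--         html += f"<td>{data.get('frames', 'N/A')}</td>"
--         html += f"<td>{data.get('rate', 'N/A')}</td>"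
--         html += f"<td>{data.get('essid', 'N/A')}</td>"
--         html += f"<td>{data.get('cipher', 'N/A')}</td>"
--         html += f"<td>{data.get('auth', 'N/A')}</td>"
--         html += f"<td>{data.get('enc', 'N/A')}</td>"
--         html += f"</tr>"
--     return html
-- ===== SOURCE B (Python) =====
-- FIELDS = ['power', 'channel', 'beacons', 'frames', 'rate', 'essid', 'cipher', 'auth', 'enc']
--
-- def format_networks_as_html(networks):
--     # Column-major: extract each column of the table across all networks first,
--     # then reassemble rows by transposing with zip(*columns).
--     items = list(networks.items())
--     columns = [[bssid for bssid, _ in items]]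
--     for key in FIELDS:
--         columns.append([data.get(key, 'N/A') for _, data in items])
--     return ''.join(
--         '<tr>' + ''.join(f'<td>{c}</td>' for c in row) + '</tr>'
--         for row in zip(*columns)
--     )
-- ===== Notes on version B (the rewrite author's own statement) =====
-- stated objective: alternative
-- what changed: B builds the table column-major: it first extracts each of the ten columns across all networks in staged passes, then transposes with zip(*columns) and joins the rows, instead of A's single row-major pass with ten unrolled string concatenations per row.
import Mathlib
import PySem

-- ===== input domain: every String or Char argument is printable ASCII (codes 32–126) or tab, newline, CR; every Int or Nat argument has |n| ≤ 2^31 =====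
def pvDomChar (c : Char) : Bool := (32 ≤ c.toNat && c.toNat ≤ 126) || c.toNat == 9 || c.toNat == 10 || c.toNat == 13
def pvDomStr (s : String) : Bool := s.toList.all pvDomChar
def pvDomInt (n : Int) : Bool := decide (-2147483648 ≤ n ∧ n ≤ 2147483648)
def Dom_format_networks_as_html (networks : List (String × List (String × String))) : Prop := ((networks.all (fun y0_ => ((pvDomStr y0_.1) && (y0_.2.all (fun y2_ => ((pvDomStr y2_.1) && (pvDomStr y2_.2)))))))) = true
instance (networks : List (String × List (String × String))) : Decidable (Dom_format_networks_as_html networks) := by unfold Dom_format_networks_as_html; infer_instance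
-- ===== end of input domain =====

-- B builds the table column-major (extract each column across all networks, then
-- transpose with zip(*columns) and join the rows) instead of A's row-major pass with
-- ten unrolled concatenations per row (objective: alternative decomposition).

-- ===== PORT A =====
def format_networks_as_html (networks : List (String × List (String × String))) : String :=
  networks.foldl (fun html p =>
    let bssid := p.1
    let data : PySem.Dict String String := PySem.Dict.mk p.2
    let html := html ++ "<tr>"
    let html := html ++ ("<td>" ++ bssid ++ "</td>")
    let html := html ++ ("<td>" ++ data.getD "power" "N/A" ++ "</td>")
    let html := html ++ ("<td>" ++ data.getD "channel" "N/A" ++ "</td>")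
    let html := html ++ ("<td>" ++ data.getD "beacons" "N/A" ++ "</td>")
    let html := html ++ ("<td>" ++ data.getD "frames" "N/A" ++ "</td>")
    let html := html ++ ("<td>" ++ data.getD "rate" "N/A" ++ "</td>")
    let html := html ++ ("<td>" ++ data.getD "essid" "N/A" ++ "</td>")
    let html := html ++ ("<td>" ++ data.getD "cipher" "N/A" ++ "</td>")
    let html := html ++ ("<td>" ++ data.getD "auth" "N/A" ++ "</td>")
    let html := html ++ ("<td>" ++ data.getD "enc" "N/A" ++ "</td>")
    html ++ "</tr>") ""

-- ===== PORT B =====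
def pvFields : List String :=
  ["power", "channel", "beacons", "frames", "rate", "essid", "cipher", "auth", "enc"]

-- Python's zip(*columns): emit tuples of heads while every column is nonempty
-- (structural recursion on the first column; zip stops at the shortest).
def pvZipAux : List String → List (List String) → List (List String)
  | [], _ => []
  | x :: xs, cs =>
    if cs.all (fun c => !c.isEmpty) then
      (x :: cs.map (fun c => c.headD "")) :: pvZipAux xs (cs.map List.tail)
    else []

def pvZipStar (cols : List (List String)) : List (List String) :=
  match cols with
  | [] => []
  | c :: cs => pvZipAux c cs

def format_networks_as_html_alt (networks : List (String × List (String × String))) : String :=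
  let columns : List (List String) :=
    (networks.map (fun p => p.1)) ::
      pvFields.map (fun key => networks.map (fun p => (PySem.Dict.mk p.2).getD key "N/A"))
  PySem.Str.join "" ((pvZipStar columns).map (fun row =>
    "<tr>" ++ PySem.Str.join "" (row.map (fun c => "<td>" ++ c ++ "</td>")) ++ "</tr>"))

-- ===== PRECONDITION & SPEC =====
def Spec_format_networks_as_html (networks : List (String × List (String × String))) (out : String) : Prop := out = format_networks_as_html_alt networks
instance (networks : List (String × List (String × String))) (out : String) : Decidable (Spec_format_networks_as_html networks out) := by unfold Spec_format_networks_as_html; infer_instance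

-- ===== CLAIM (what is proved, stated in full; the proofs are below) =====
def Claim_equal_format_networks_as_html : Prop := ∀ (networks : List (String × List (String × String))), Dom_format_networks_as_html networks → Spec_format_networks_as_html networks (format_networks_as_html networks)

-- ===== LEMMAS AND PROOFS =====

theorem pv_join_nil : PySem.Str.join "" ([] : List String) = "" := by
  apply String.toList_inj.mp
  simp [PySem.Str.toList_join, PySem.Chars.join, List.intercalate]

theorem pv_join_cons (a : String) (l : List String) :
    PySem.Str.join "" (a :: l) = a ++ PySem.Str.join "" l := by
  apply String.toList_inj.mp
  simp [PySem.Str.toList_join, PySem.Chars.join, List.intercalate]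
  cases l <;> simp

-- transposing column-wise maps gives the row-wise map
theorem pv_zip_maps {α β : Type} (l : List α) (f : α → String) (fs : List β) (g : β → α → String) :
    pvZipStar ((l.map f) :: fs.map (fun k => l.map (g k)))
      = l.map (fun p => f p :: fs.map (fun k => g k p)) := by
  show pvZipAux (l.map f) (fs.map (fun k => l.map (g k)))
      = l.map (fun p => f p :: fs.map (fun k => g k p))
  induction l with
  | nil => simp [pvZipAux]
  | cons a l ih =>
    simp only [List.map_cons, pvZipAux, List.map_map, Function.comp_def, List.headD_cons,
      List.tail_cons, List.all_map, List.all_eq_true]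
    rw [if_pos (by intro k _; simp)]
    rw [ih]

theorem pv_alt_rows (l : List (String × List (String × String))) :
    format_networks_as_html_alt l
      = PySem.Str.join "" (l.map (fun p =>
          "<tr>" ++ PySem.Str.join "" (("<td>" ++ p.1 ++ "</td>") ::
            pvFields.map (fun k => "<td>" ++ (PySem.Dict.mk p.2).getD k "N/A" ++ "</td>")) ++ "</tr>")) := by
  unfold format_networks_as_html_alt
  simp only [pv_zip_maps l (fun p => p.1) pvFields (fun k p => (PySem.Dict.mk p.2).getD k "N/A"),
    List.map_map, Function.comp_def, List.map_cons, pv_join_cons]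

theorem pv_foldl_eq (l : List (String × List (String × String))) (init : String) :
    l.foldl (fun html p =>
      let bssid := p.1
      let data : PySem.Dict String String := PySem.Dict.mk p.2
      let html := html ++ "<tr>"
      let html := html ++ ("<td>" ++ bssid ++ "</td>")
      let html := html ++ ("<td>" ++ data.getD "power" "N/A" ++ "</td>")
      let html := html ++ ("<td>" ++ data.getD "channel" "N/A" ++ "</td>")
      let html := html ++ ("<td>" ++ data.getD "beacons" "N/A" ++ "</td>")
      let html := html ++ ("<td>" ++ data.getD "frames" "N/A" ++ "</td>")
      let html := html ++ ("<td>" ++ data.getD "rate" "N/A" ++ "</td>")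
      let html := html ++ ("<td>" ++ data.getD "essid" "N/A" ++ "</td>")
      let html := html ++ ("<td>" ++ data.getD "cipher" "N/A" ++ "</td>")
      let html := html ++ ("<td>" ++ data.getD "auth" "N/A" ++ "</td>")
      let html := html ++ ("<td>" ++ data.getD "enc" "N/A" ++ "</td>")
      html ++ "</tr>") init
    = init ++ format_networks_as_html_alt l := by
  induction l generalizing init with
  | nil => simp [pv_alt_rows, pv_join_nil]
  | cons p rest ih =>
    simp only [List.foldl_cons, ih]
    rw [pv_alt_rows, pv_alt_rows]
    simp [pvFields, pv_join_cons, pv_join_nil, String.append_assoc]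

-- ===== VERDICT (by name: the statement is the Claim_ definition above) =====
theorem format_networks_as_html_spec : Claim_equal_format_networks_as_html := by
  intro networks _
  unfold Spec_format_networks_as_html format_networks_as_html
  rw [pv_foldl_eq]
  apply String.toList_inj.mp
  simp
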